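-- pv_equiv track=rewrite | github.com/Cossy179/NAGS | src/gnn/board_encoder.py | _get_king_safety_squares
-- ===== SOURCE A (Python) =====
-- def _get_king_safety_squares(board, king_square):
--     """Get squares that form the king safety zone."""
--     if king_square is None:
--         return []
--
--     rank = king_square // 8
--     file = king_square % 8
--
--     safety_squares = []
--     for r in range(max(0, rank - 1), min(8, rank + 2)):
--         for f in range(max(0, file - 1), min(8, file + 2)):
--             square = r * 8 + f
--             if square != king_square:
--                 safety_squares.append(square)
--
--     return safety_squares
-- ===== SOURCE B (Python) =====
-- def _get_king_safety_squares(board, king_square):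
--     """Get squares that form the king safety zone."""
--     if king_square is None:
--         return []
--
--     rank = king_square // 8
--     file = king_square % 8
--
--     return [sq for sq in range(64)
--             if abs(sq // 8 - rank) <= 1
--             and abs(sq % 8 - file) <= 1
--             and sq != king_square]
-- ===== Notes on version B (the rewrite author's own statement) =====
-- stated objective: alternative
-- what changed: Instead of enumerating the clamped 3x3 neighborhood with nested range loops, B scans all 64 board squares once and filters them by a Chebyshev-distance-<=1 predicate on the square's own rank/file relative to the king.
import Mathlib
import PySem

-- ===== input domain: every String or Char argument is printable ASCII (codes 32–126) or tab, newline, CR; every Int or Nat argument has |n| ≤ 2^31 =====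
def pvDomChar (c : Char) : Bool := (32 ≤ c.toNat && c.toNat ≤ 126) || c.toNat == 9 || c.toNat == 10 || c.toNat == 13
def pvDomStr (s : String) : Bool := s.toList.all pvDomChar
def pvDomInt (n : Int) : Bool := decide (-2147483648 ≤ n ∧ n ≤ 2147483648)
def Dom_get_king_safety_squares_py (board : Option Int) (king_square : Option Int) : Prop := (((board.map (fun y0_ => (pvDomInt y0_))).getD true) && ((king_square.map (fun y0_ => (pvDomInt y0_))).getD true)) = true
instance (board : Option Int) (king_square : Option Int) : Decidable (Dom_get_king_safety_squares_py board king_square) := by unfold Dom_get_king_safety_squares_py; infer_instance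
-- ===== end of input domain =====

-- B scans all 64 board squares once and keeps those within Chebyshev distance 1 of the king (alternative decomposition, same cost); board is unused by both.


-- ===== PORT A =====
def get_king_safety_squares_py (board : Option Int) (king_square : Option Int) : List Int :=
  match king_square with
  | none => []
  | some k =>
    let rank := PySem.Int.floordiv k 8
    let file := PySem.Int.mod k 8
    (PySem.List.pyRange (max 0 (rank - 1)) (min 8 (rank + 2)) 1).foldl (fun acc r =>
      (PySem.List.pyRange (max 0 (file - 1)) (min 8 (file + 2)) 1).foldl (fun acc2 f =>
        let square := r * 8 + f
        if square ≠ k then acc2 ++ [square] else acc2) acc) []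

-- ===== PORT B =====
-- B: single scan of the 64 board squares, filtered by a Chebyshev-distance predicate
def get_king_safety_squares_py_alt (board : Option Int) (king_square : Option Int) : List Int :=
  match king_square with
  | none => []
  | some k =>
    let rank := PySem.Int.floordiv k 8
    let file := PySem.Int.mod k 8
    (PySem.List.pyRange 0 64 1).filter (fun sq =>
      decide (|PySem.Int.floordiv sq 8 - rank| ≤ 1) &&
      decide (|PySem.Int.mod sq 8 - file| ≤ 1) &&
      decide (sq ≠ k))

-- ===== PRECONDITION & SPEC =====
def Spec_get_king_safety_squares_py (board : Option Int) (king_square : Option Int) (out : List Int) : Prop := out = get_king_safety_squares_py_alt board king_square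
instance (board : Option Int) (king_square : Option Int) (out : List Int) : Decidable (Spec_get_king_safety_squares_py board king_square out) := by unfold Spec_get_king_safety_squares_py; infer_instance

-- ===== CLAIM (what is proved, stated in full; the proofs are below) =====
def Claim_equal_get_king_safety_squares_py : Prop := ∀ (board : Option Int) (king_square : Option Int), Dom_get_king_safety_squares_py board king_square → Spec_get_king_safety_squares_py board king_square (get_king_safety_squares_py board king_square)

-- ===== LEMMAS AND PROOFS =====
lemma pv_some_eq (b : Option Int) (k : Int) :
    get_king_safety_squares_py b (some k) = get_king_safety_squares_py_alt b (some k) := by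
  simp only [get_king_safety_squares_py, get_king_safety_squares_py_alt]
  rw [PySem.Int.floordiv_eq_ediv_of_pos (by norm_num : (0:Int) < 8),
      PySem.Int.mod_eq_emod_of_pos (by norm_num : (0:Int) < 8)]
  have hk : k = 8 * (k / 8) + k % 8 := by omega
  have hm0 : 0 ≤ k % 8 := by omega
  have hm7 : k % 8 ≤ 7 := by omega
  generalize hQ : k / 8 = q at *
  generalize hM : k % 8 = m at *
  clear hQ hM
  by_cases hin : -1 ≤ q ∧ q ≤ 8
  · obtain ⟨h1, h2⟩ := hin
    subst hk
    interval_cases q <;> interval_cases m <;>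
      simp only [PySem.Int.floordiv_eq_ediv_of_pos (by norm_num : (0:Int) < 8),
                 PySem.Int.mod_eq_emod_of_pos (by norm_num : (0:Int) < 8)] <;> decide
  · -- rank out of [-1, 8]: both sides are empty
    have hA : PySem.List.pyRange (max 0 (q - 1)) (min 8 (q + 2)) 1 = [] := by
      rw [PySem.List.pyRange_one]
      have : (min 8 (q + 2) - max 0 (q - 1)).toNat = 0 := by omega
      simp [this]
    rw [hA]
    simp only [List.foldl]
    symm
    rw [List.filter_eq_nil_iff]
    intro sq hmem
    rw [PySem.List.mem_pyRange_one] at hmem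
    rw [PySem.Int.floordiv_eq_ediv_of_pos (by norm_num : (0:Int) < 8)]
    have : 0 ≤ sq / 8 ∧ sq / 8 ≤ 7 := by omega
    simp only [Bool.and_eq_true, decide_eq_true_eq, abs_le, not_and]
    intro h
    omega

-- ===== VERDICT (by name: the statement is the Claim_ definition above) =====
theorem get_king_safety_squares_py_spec : Claim_equal_get_king_safety_squares_py := by
  intro board king_square _
  unfold Spec_get_king_safety_squares_py
  cases king_square with
  | none => rfl
  | some k => exact pv_some_eq board k
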